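-- pv_equiv track=rewrite | github.com/karimkhaleel/aoc2023 | 2024/12/main.py | get_num_sides
-- ===== SOURCE A (Python) =====
-- def get_num_sides(flowers: list[tuple[int, int]]) -> int:
--     x1 = min([g[0] for g in flowers])
--     y1 = min([g[1] for g in flowers])
--     x2 = max([g[0] for g in flowers]) + 1
--     y2 = max([g[1] for g in flowers]) + 1
--     garden = [[0] * (y2 - y1) for _ in range(x2 - x1)]
--     for x, y in flowers:
--         garden[x - x1][y - y1] = 1
--
--     total = 0
--     # tops
--     sides = 0
--     for x in range(len(garden)):
--         in_side = False
--         for y in range(len(garden[x])):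
--             if garden[x][y] and (x == 0 or not garden[x - 1][y]):
--                 if not in_side:
--                     sides += 1
--                     in_side = True
--             else:
--                 in_side = False
--     total += sides
--     # bottoms
--     sides = 0
--     for x in reversed(range(len(garden))):
--         in_side = False
--         for y in range(len(garden[x])):
--             if garden[x][y] and (x == len(garden) - 1 or not garden[x + 1][y]):
--                 if not in_side:
--                     sides += 1
--                     in_side = True
--             else:
--                 in_side = False
--     total += sides
--     # lefts
--     sides = 0
--     for y in range(len(garden[0])):
--         in_side = False
--         for x in range(len(garden)):
--             if garden[x][y] and (y == 0 or not garden[x][y - 1]):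
--                 if not in_side:
--                     sides += 1
--                     in_side = True
--             else:
--                 in_side = False
--     total += sides
--     # rights
--     sides = 0
--     for y in reversed(range(len(garden[0]))):
--         in_side = False
--         for x in range(len(garden)):
--             if garden[x][y] and (y == len(garden[0]) - 1 or not garden[x][y + 1]):
--                 if not in_side:
--                     sides += 1
--                     in_side = True
--             else:
--                 in_side = False
--     total += sides
--     return total
-- ===== SOURCE B (Python) =====
-- def get_num_sides(flowers: list[tuple[int, int]]) -> int:
--     # Corner/run-start counting over a set: O(n) in the number of cells,
--     # independent of the bounding-box area.
--     s = set(flowers)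
--
--     def top(x, y):
--         return (x, y) in s and (x - 1, y) not in s
--
--     def bot(x, y):
--         return (x, y) in s and (x + 1, y) not in s
--
--     def left(x, y):
--         return (x, y) in s and (x, y - 1) not in s
--
--     def right(x, y):
--         return (x, y) in s and (x, y + 1) not in s
--
--     total = 0
--     for (x, y) in s:
--         if top(x, y) and not top(x, y - 1):
--             total += 1
--         if bot(x, y) and not bot(x, y - 1):
--             total += 1
--         if left(x, y) and not left(x - 1, y):
--             total += 1
--         if right(x, y) and not right(x - 1, y):
--             total += 1
--     return total
-- ===== Notes on version B (the rewrite author's own statement) =====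
-- stated objective: faster
-- what changed: B replaces A's bounding-box grid plus four directional run-scans by a single pass over the set of cells that counts run-start corners via set membership, making the cost depend on the number of cells instead of the bounding-box area.
import Mathlib
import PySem

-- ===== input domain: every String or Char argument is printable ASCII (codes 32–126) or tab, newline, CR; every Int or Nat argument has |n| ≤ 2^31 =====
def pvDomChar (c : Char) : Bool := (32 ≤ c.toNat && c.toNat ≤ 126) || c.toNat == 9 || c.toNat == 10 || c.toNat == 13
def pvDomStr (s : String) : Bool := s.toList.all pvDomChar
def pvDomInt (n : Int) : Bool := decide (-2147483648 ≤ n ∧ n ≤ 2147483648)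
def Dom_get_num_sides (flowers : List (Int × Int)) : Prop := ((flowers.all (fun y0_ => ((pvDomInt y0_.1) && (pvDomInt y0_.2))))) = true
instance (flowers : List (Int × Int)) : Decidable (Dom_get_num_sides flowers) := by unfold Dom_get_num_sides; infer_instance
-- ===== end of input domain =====

-- B counts side starts (corners) by set membership in one pass over the distinct cells,
-- instead of A's four run-scans over the whole bounding-box grid; equivalence proved on
-- nonempty input (A raises ValueError on []).

-- ===== PORT A =====
def pvTruthy (n : Int) : Bool := n != 0
-- Python read a[i] (negative index wraps once; a read that would raise returns the default,
-- which in A only happens where the value cannot influence the guarded condition)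
-- Python read a[i] (negative index wraps once; a read that would raise returns the default,
-- which in A only happens where the value cannot influence the guarded condition)
def aGet1 {α : Type} (a : Array α) (i : Int) (d : α) : α :=
  let j := if i < 0 then i + (a.size : Int) else i
  if h : 0 ≤ j ∧ j.toNat < a.size then a[j.toNat] else d
-- Python write a[i] = v (negative index wraps once; all writes A performs are in range)
-- Python write a[i] = v (negative index wraps once; all writes A performs are in range)
def aSet1 {α : Type} (a : Array α) (i : Int) (v : α) : Array α :=
  let j := if i < 0 then i + (a.size : Int) else i
  a.setIfInBounds j.toNat v
def pvGet (g : Array (Array Int)) (x y : Int) : Int := aGet1 (aGet1 g x #[]) y 0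
def pvSet2 (g : Array (Array Int)) (x y : Int) (v : Int) : Array (Array Int) :=
  aSet1 g x (aSet1 (aGet1 g x #[]) y v)
def pvRun (p : Int → Bool) (st : Int × Bool) (l : List Int) : Int × Bool :=
  l.foldl (fun st y => if p y then (if st.2 then st else (st.1 + 1, true)) else (st.1, false)) st
def get_num_sides (flowers : List (Int × Int)) : Int :=
  -- min/max of an empty list raise in Python; Pre_ excludes [] so the .getD default is never used
  let x1 := (PySem.List.min? (flowers.map (fun g => g.1)) (fun v => v)).getD 0
  let y1 := (PySem.List.min? (flowers.map (fun g => g.2)) (fun v => v)).getD 0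
  let x2 := (PySem.List.max? (flowers.map (fun g => g.1)) (fun v => v)).getD 0 + 1
  let y2 := (PySem.List.max? (flowers.map (fun g => g.2)) (fun v => v)).getD 0 + 1
  -- Python lists of ints held as Arrays so grid reads/writes are O(1) (same values, same order)
  let garden0 : Array (Array Int) :=
    ((PySem.List.pyRange 0 (x2 - x1) 1).map (fun _ => Array.replicate (y2 - y1).toNat 0)).toArray
  let garden := flowers.foldl (fun g p => pvSet2 g (p.1 - x1) (p.2 - y1) 1) garden0
  -- tops
  let tops := (PySem.List.pyRange 0 (garden.size : Int) 1).foldl (fun s x =>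
      (pvRun (fun y => pvTruthy (pvGet garden x y) &&
                        (x == 0 || !pvTruthy (pvGet garden (x - 1) y)))
        (s, false) (PySem.List.pyRange 0 ((aGet1 garden x #[]).size : Int) 1)).1) 0
  -- bottoms
  let bots := ((PySem.List.pyRange 0 (garden.size : Int) 1).reverse).foldl (fun s x =>
      (pvRun (fun y => pvTruthy (pvGet garden x y) &&
                        (x == (garden.size : Int) - 1 || !pvTruthy (pvGet garden (x + 1) y)))
        (s, false) (PySem.List.pyRange 0 ((aGet1 garden x #[]).size : Int) 1)).1) 0
  -- lefts
  let lefts := (PySem.List.pyRange 0 ((aGet1 garden 0 #[]).size : Int) 1).foldl (fun s y =>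
      (pvRun (fun x => pvTruthy (pvGet garden x y) &&
                        (y == 0 || !pvTruthy (pvGet garden x (y - 1))))
        (s, false) (PySem.List.pyRange 0 (garden.size : Int) 1)).1) 0
  -- rights
  let rights := ((PySem.List.pyRange 0 ((aGet1 garden 0 #[]).size : Int) 1).reverse).foldl (fun s y =>
      (pvRun (fun x => pvTruthy (pvGet garden x y) &&
                        (y == ((aGet1 garden 0 #[]).size : Int) - 1 ||
                         !pvTruthy (pvGet garden x (y + 1))))
        (s, false) (PySem.List.pyRange 0 (garden.size : Int) 1)).1) 0
  tops + bots + lefts + rights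

-- ===== PORT B =====
def pvIn (s : List (Int × Int)) (x y : Int) : Bool := s.contains (x, y)
def pvTop (s : List (Int × Int)) (x y : Int) : Bool := pvIn s x y && !pvIn s (x - 1) y
def pvBot (s : List (Int × Int)) (x y : Int) : Bool := pvIn s x y && !pvIn s (x + 1) y
def pvLeft (s : List (Int × Int)) (x y : Int) : Bool := pvIn s x y && !pvIn s x (y - 1)
def pvRight (s : List (Int × Int)) (x y : Int) : Bool := pvIn s x y && !pvIn s x (y + 1)
def get_num_sides_alt (flowers : List (Int × Int)) : Int :=
  let s := PySem.Set.ofList flowers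
  s.foldl (fun t p =>
    let t := if pvTop s p.1 p.2 && !pvTop s p.1 (p.2 - 1) then t + 1 else t
    let t := if pvBot s p.1 p.2 && !pvBot s p.1 (p.2 - 1) then t + 1 else t
    let t := if pvLeft s p.1 p.2 && !pvLeft s (p.1 - 1) p.2 then t + 1 else t
    let t := if pvRight s p.1 p.2 && !pvRight s (p.1 - 1) p.2 then t + 1 else t
    t) 0

-- ===== PRECONDITION & SPEC =====
-- Pre_ excludes only the empty list, on which A raises ValueError (min of an empty sequence).
def Pre_get_num_sides (flowers : List (Int × Int)) : Prop := flowers ≠ []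
instance (flowers : List (Int × Int)) : Decidable (Pre_get_num_sides flowers) := by
  unfold Pre_get_num_sides; infer_instance
def pvWitness_get_num_sides : (List (Int × Int)) := [(0, 0), (0, 1)]

def Spec_get_num_sides (flowers : List (Int × Int)) (out : Int) : Prop := out = get_num_sides_alt flowers
instance (flowers : List (Int × Int)) (out : Int) : Decidable (Spec_get_num_sides flowers out) := by
  unfold Spec_get_num_sides; infer_instance

-- ===== CLAIM (what is proved, stated in full; the proofs are below) =====
def Claim_equal_get_num_sides : Prop := ∀ (flowers : List (Int × Int)), Dom_get_num_sides flowers → Pre_get_num_sides flowers → Spec_get_num_sides flowers (get_num_sides flowers)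

-- ===== LEMMAS AND PROOFS =====

lemma run_count (p : Int → Bool) : ∀ (n : Nat) (a : Int) (s : Int) (inside : Bool), inside = p (a-1) →
    (pvRun p (s, inside) (PySem.List.pyRange a (a + n) 1)).1
      = s + ((PySem.List.pyRange a (a + n) 1).countP (fun y => p y && !p (y-1)) : Int) := by
  intro n
  induction n with
  | zero =>
    intro a s inside h
    rw [show a + ((0:Nat):Int) = a by simp, PySem.List.pyRange_one_eq_nil (le_refl a)]
    simp [pvRun]
  | succ m ih =>
    intro a s inside h
    rw [PySem.List.pyRange_one_cons (by omega)]
    have hr : a + 1 + (m : Int) = a + ((m : Nat) + 1 : Nat) := by push_cast; ring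
    have step : pvRun p (s, inside) (a :: PySem.List.pyRange (a+1) (a + ((m:Nat)+1:Nat)) 1)
        = pvRun p (s + (if p a && !inside then 1 else 0), p a) (PySem.List.pyRange (a+1) (a + ((m:Nat)+1:Nat)) 1) := by
      simp only [pvRun, List.foldl_cons]
      congr 1
      cases hpa : p a <;> cases hin : inside <;> simp [hpa, hin]
    rw [step]
    have hrange : PySem.List.pyRange (a+1) (a + ((m:Nat)+1:Nat)) 1 = PySem.List.pyRange (a+1) ((a+1) + (m:Nat)) 1 := by
      congr 1; push_cast; ring
    rw [hrange, ih (a+1) _ (p a) (by simp)]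
    have : (p a && !p (a - 1)) = (p a && !inside) := by rw [h]
    rw [List.countP_cons, this]
    cases hc : (p a && !inside) <;> simp [hc] <;> push_cast <;> ring

lemma run_shift (pgrid pabs : Int → Bool) (o : Int) (n : Nat) (s : Int)
    (hagree : ∀ k : Int, 0 ≤ k → k < (n:Int) → pgrid k = pabs (k + o))
    (hinit : pabs (o - 1) = false) :
    (pvRun pgrid (s, false) (PySem.List.pyRange 0 (n:Int) 1)).1
      = s + ((PySem.List.pyRange o (o + (n:Int)) 1).countP (fun y => pabs y && !pabs (y-1)) : Int) := by
  have h1 : pvRun pgrid (s, false) (PySem.List.pyRange 0 (n:Int) 1)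
      = pvRun (fun k => pabs (k + o)) (s, false) (PySem.List.pyRange 0 (n:Int) 1) := by
    unfold pvRun
    apply PySem.List.foldl_congr_mem
    intro acc x hx
    rw [PySem.List.mem_pyRange_one] at hx
    rw [hagree x hx.1 hx.2]
  have h2 : pvRun (fun k => pabs (k + o)) (s, false) (PySem.List.pyRange 0 (n:Int) 1)
      = pvRun pabs (s, false) (PySem.List.pyRange o (o + (n:Int)) 1) := by
    unfold pvRun
    rw [PySem.List.pyRange_one 0, PySem.List.pyRange_one o]
    rw [List.foldl_map, List.foldl_map]
    simp only [show o + (n:Int) - o = (n:Int) - 0 by ring]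
    apply PySem.List.foldl_congr_mem
    intro acc k hk
    have e : (0 : Int) + (k : Int) + o = o + (k : Int) := by ring
    simp only [e]
  rw [h1, h2, run_count pabs n o s false hinit.symm]

lemma agetD_eq {α : Type} (a : Array α) (i : Nat) (d : α) (h : i < a.size) :
    a.getD i d = a[i] := (Array.getElem_eq_getD d).symm

lemma aGet1_natCast {α : Type} (a : Array α) (u : Nat) (d : α) :
    aGet1 a (u : Int) d = a.getD u d := by
  unfold aGet1
  simp only [show (if (u:Int) < 0 then (u:Int) + (a.size : Int) else (u:Int)) = (u:Int) from
    by rw [if_neg (by omega)]]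
  by_cases h : u < a.size
  · rw [dif_pos ⟨by omega, by simpa using h⟩, agetD_eq _ _ _ h]
    simp
  · rw [dif_neg (by simp [h]), Array.getD_eq_getD_getElem?,
      Array.getElem?_eq_none (by omega), Option.getD_none]

lemma aSet1_eq {α : Type} (a : Array α) (i : Int) (v : α) (h0 : 0 ≤ i) (h : i.toNat < a.size) :
    aSet1 a i v = a.set i.toNat v h := by
  unfold aSet1
  simp only [show (if i < 0 then i + (a.size : Int) else i) = i from by rw [if_neg (by omega)]]
  simp [Array.setIfInBounds, h]

lemma pvGet_natCast (g : Array (Array Int)) (u v : Nat) :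
    pvGet g (u:Int) (v:Int) = (g.getD u #[]).getD v 0 := by
  rw [pvGet, aGet1_natCast, aGet1_natCast]

lemma pvSet2_eq (g : Array (Array Int)) (x y v : Int) (hx : 0 ≤ x) (hx2 : x.toNat < g.size)
    (hy : 0 ≤ y) (hy2 : y.toNat < (g.getD x.toNat #[]).size) :
    pvSet2 g x y v = g.set x.toNat ((g.getD x.toNat #[]).set y.toNat v hy2) hx2 := by
  have ex : x = ((x.toNat : Nat) : Int) := (Int.toNat_of_nonneg hx).symm
  rw [pvSet2]
  conv_lhs => rw [ex, aGet1_natCast]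
  rw [aSet1_eq _ y _ hy (by simpa using hy2),
      aSet1_eq _ ((x.toNat : Nat) : Int) _ (by omega) (by omega)]
  simp [show (max x 0).toNat = x.toNat from by omega]

lemma set2_entry (N M : Nat) (g : Array (Array Int)) (hlen : g.size = N)
    (hrow : ∀ u : Nat, u < N → (g.getD u #[]).size = M) (x y v : Int) (hx : 0 ≤ x) (hxN : x < (N:Int))
    (hy : 0 ≤ y) (hyM : y < (M:Int)) :
    (pvSet2 g x y v).size = N ∧ (∀ u : Nat, u < N → ((pvSet2 g x y v).getD u #[]).size = M) ∧
    (∀ u w : Nat, u < N → w < M →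
      ((pvSet2 g x y v).getD u #[]).getD w 0
        = if (u:Int) = x ∧ (w:Int) = y then v else (g.getD u #[]).getD w 0) := by
  have hxN' : x.toNat < g.size := by omega
  have hyM' : y.toNat < (g.getD x.toNat #[]).size := by rw [hrow _ (by omega)]; omega
  rw [pvSet2_eq g x y v hx hxN' hy hyM']
  have hgetrow : ∀ u : Nat, u < N →
      (g.set x.toNat ((g.getD x.toNat #[]).set y.toNat v hyM') hxN').getD u #[]
        = if x.toNat = u then (g.getD x.toNat #[]).set y.toNat v hyM' else g.getD u #[] := by
    intro u hu
    have hu' : u < (g.set x.toNat ((g.getD x.toNat #[]).set y.toNat v hyM') hxN').size := by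
      rw [Array.size_set]; omega
    rw [agetD_eq _ _ _ hu', Array.getElem_set]
    by_cases h : x.toNat = u
    · rw [if_pos h, if_pos h]
    · rw [if_neg h, if_neg h]
      exact (agetD_eq _ _ _ (show u < g.size from by omega)).symm
  refine ⟨by rw [Array.size_set]; exact hlen, ?_, ?_⟩
  · intro u hu
    rw [hgetrow u hu]
    by_cases h : x.toNat = u
    · rw [if_pos h, Array.size_set]
      exact hrow _ (by omega)
    · rw [if_neg h]
      exact hrow u hu
  · intro u w hu hw
    rw [hgetrow u hu]
    by_cases hux : x.toNat = u
    · rw [if_pos hux]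
      have hw' : w < (g.getD x.toNat #[]).size := by rw [hrow _ (by omega)]; omega
      have hrd : ((g.getD x.toNat #[]).set y.toNat v hyM').getD w 0
          = if y.toNat = w then v else (g.getD x.toNat #[]).getD w 0 := by
        rw [agetD_eq _ _ _ (by rw [Array.size_set]; exact hw'), Array.getElem_set]
        by_cases hwy : y.toNat = w
        · rw [if_pos hwy, if_pos hwy]
        · rw [if_neg hwy, if_neg hwy, agetD_eq _ _ _ hw']
      rw [hrd]
      by_cases hwy : y.toNat = w
      · rw [if_pos hwy, if_pos ⟨by omega, by omega⟩]
      · rw [if_neg hwy, if_neg (by omega : ¬((u:Int) = x ∧ (w:Int) = y)), ← hux]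
    · rw [if_neg hux, if_neg (by omega : ¬((u:Int) = x ∧ (w:Int) = y))]

lemma grid_fold (x1 y1 : Int) (N M : Nat) :
    ∀ (fl : List (Int × Int)) (g : Array (Array Int)),
    g.size = N → (∀ u : Nat, u < N → (g.getD u #[]).size = M) →
    (∀ q ∈ fl, 0 ≤ q.1 - x1 ∧ q.1 - x1 < (N:Int) ∧ 0 ≤ q.2 - y1 ∧ q.2 - y1 < (M:Int)) →
    ((fl.foldl (fun g p => pvSet2 g (p.1 - x1) (p.2 - y1) 1) g).size = N ∧
     (∀ u : Nat, u < N → ((fl.foldl (fun g p => pvSet2 g (p.1 - x1) (p.2 - y1) 1) g).getD u #[]).size = M) ∧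
     (∀ u w : Nat, u < N → w < M →
       ((fl.foldl (fun g p => pvSet2 g (p.1 - x1) (p.2 - y1) 1) g).getD u #[]).getD w 0
         = if ((u:Int) + x1, (w:Int) + y1) ∈ fl then 1 else (g.getD u #[]).getD w 0)) := by
  intro fl
  induction fl with
  | nil => intro g h1 h2 _; exact ⟨h1, h2, fun u w _ _ => by simp⟩
  | cons q t ih =>
    intro g h1 h2 hb
    have hq := hb q (by simp)
    obtain ⟨s1, s2, s3⟩ := set2_entry N M g h1 h2 (q.1 - x1) (q.2 - y1) 1 hq.1 hq.2.1 hq.2.2.1 hq.2.2.2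
    obtain ⟨r1, r2, r3⟩ := ih (pvSet2 g (q.1 - x1) (q.2 - y1) 1) s1 s2 (fun p hp => hb p (by simp [hp]))
    refine ⟨r1, r2, ?_⟩
    intro u w hu hw
    simp only [List.foldl_cons]
    rw [r3 u w hu hw, s3 u w hu hw]
    by_cases hm : ((u:Int) + x1, (w:Int) + y1) ∈ t
    · simp [hm]
    · by_cases he : ((u:Int) + x1, (w:Int) + y1) = q
      · have : (u:Int) = q.1 - x1 ∧ (w:Int) = q.2 - y1 := by
          rw [← he]; constructor <;> simp
        simp [hm, he, this]
      · have hne : ¬((u:Int) = q.1 - x1 ∧ (w:Int) = q.2 - y1) := by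
          intro ⟨ha, hb'⟩
          apply he
          have : q = (q.1, q.2) := rfl
          rw [this]; congr 1 <;> omega
        simp [hm, he, hne]

lemma sum_map_shift (c : Int → Int) (o : Int) (n : Nat) :
    ((PySem.List.pyRange 0 (n:Int) 1).map (fun x => c (x + o))).sum
      = ((PySem.List.pyRange o (o + (n:Int)) 1).map c).sum := by
  rw [PySem.List.pyRange_one, PySem.List.pyRange_one, List.map_map, List.map_map]
  simp only [show (n:Int) - 0 = (n:Int) from by ring, show o + (n:Int) - o = (n:Int) from by ring]
  congr 1
  apply List.map_congr_left
  intro k _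
  simp only [Function.comp_apply]
  congr 1
  ring

lemma sum_countP_product (l2 : List Int) (q : Int → Int → Bool) :
    ∀ (l1 : List Int),
    ((l1.map (fun a => ((l2.countP (fun b => q a b) : Nat) : Int))).sum)
      = (((l1 ×ˢ l2).countP (fun p => q p.1 p.2) : Nat) : Int) := by
  intro l1
  induction l1 with
  | nil => simp
  | cons a t ih =>
    rw [List.map_cons, List.sum_cons, ih, List.product_cons, List.countP_append, List.countP_map]
    have e : List.countP ((fun p => q p.1 p.2) ∘ fun b => (a, b)) l2 = List.countP (fun b => q a b) l2 := rfl
    rw [e]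
    push_cast
    ring

lemma countP_eq_of_nodup (l1 l2 : List (Int × Int)) (h1 : l1.Nodup) (h2 : l2.Nodup)
    (P : Int × Int → Bool) (h : ∀ p, P p = true → (p ∈ l1 ↔ p ∈ l2)) :
    l1.countP P = l2.countP P := by
  rw [List.countP_eq_length_filter, List.countP_eq_length_filter]
  apply List.Perm.length_eq
  rw [List.perm_ext_iff_of_nodup (h1.filter P) (h2.filter P)]
  intro p
  simp only [List.mem_filter]
  constructor
  · rintro ⟨hm, hp⟩; exact ⟨(h p hp).1 hm, hp⟩
  · rintro ⟨hm, hp⟩; exact ⟨(h p hp).2 hm, hp⟩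

lemma sum_countP_product_T (l1 l2 : List Int) (h1 : l1.Nodup) (h2 : l2.Nodup) (q : Int → Int → Bool) :
    ((l2.map (fun b => ((l1.countP (fun a => q a b) : Nat) : Int))).sum)
      = (((l1 ×ˢ l2).countP (fun p => q p.1 p.2) : Nat) : Int) := by
  rw [sum_countP_product l1 (fun b a => q a b) l2]
  congr 1
  have hswapinj : Function.Injective (Prod.swap : Int × Int → Int × Int) :=
    fun a b h => Prod.swap_injective h
  have hperm : (((l2 ×ˢ l1).map Prod.swap)).Perm (l1 ×ˢ l2) := by
    rw [List.perm_ext_iff_of_nodup ((h2.product h1).map hswapinj) (h1.product h2)]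
    rintro ⟨a, b⟩
    simp only [List.mem_map, List.mem_product, Prod.exists, Prod.swap_prod_mk, Prod.mk.injEq]
    constructor
    · rintro ⟨c, d, ⟨hc, hd⟩, rfl, rfl⟩; exact ⟨hd, hc⟩
    · rintro ⟨ha, hb⟩; exact ⟨b, a, ⟨hb, ha⟩, rfl, rfl⟩
  calc List.countP (fun p => (fun b a => q a b) p.1 p.2) (l2 ×ˢ l1)
      = List.countP ((fun p : Int × Int => q p.1 p.2) ∘ Prod.swap) (l2 ×ˢ l1) := rfl
    _ = List.countP (fun p => q p.1 p.2) ((l2 ×ˢ l1).map Prod.swap) := List.countP_map.symm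
    _ = List.countP (fun p => q p.1 p.2) (l1 ×ˢ l2) := hperm.countP_eq _

def pT (F : List (Int × Int)) (a b : Int) : Bool := decide ((a, b) ∈ F) && !decide ((a - 1, b) ∈ F)

def pB (F : List (Int × Int)) (a b : Int) : Bool := decide ((a, b) ∈ F) && !decide ((a + 1, b) ∈ F)

def pL (F : List (Int × Int)) (a b : Int) : Bool := decide ((a, b) ∈ F) && !decide ((a, b - 1) ∈ F)

def pR (F : List (Int × Int)) (a b : Int) : Bool := decide ((a, b) ∈ F) && !decide ((a, b + 1) ∈ F)

theorem main_eq (F : List (Int × Int)) (hne : F ≠ []) :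
    get_num_sides F = get_num_sides_alt F := by
  -- min/max exist
  obtain ⟨x1, e1⟩ : ∃ m, PySem.List.min? (F.map fun g => g.1) (fun v => v) = some m := by
    cases h : PySem.List.min? (F.map fun g => g.1) (fun v => v) with
    | none => exact absurd (List.map_eq_nil_iff.mp ((PySem.List.min?_eq_none_iff _ _).mp h)) hne
    | some m => exact ⟨m, rfl⟩
  obtain ⟨y1, e2⟩ : ∃ m, PySem.List.min? (F.map fun g => g.2) (fun v => v) = some m := by
    cases h : PySem.List.min? (F.map fun g => g.2) (fun v => v) with
    | none => exact absurd (List.map_eq_nil_iff.mp ((PySem.List.min?_eq_none_iff _ _).mp h)) hne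
    | some m => exact ⟨m, rfl⟩
  obtain ⟨xM, e3⟩ : ∃ m, PySem.List.max? (F.map fun g => g.1) (fun v => v) = some m := by
    cases h : PySem.List.max? (F.map fun g => g.1) (fun v => v) with
    | none => exact absurd (List.map_eq_nil_iff.mp ((PySem.List.max?_eq_none_iff _ _).mp h)) hne
    | some m => exact ⟨m, rfl⟩
  obtain ⟨yM, e4⟩ : ∃ m, PySem.List.max? (F.map fun g => g.2) (fun v => v) = some m := by
    cases h : PySem.List.max? (F.map fun g => g.2) (fun v => v) with
    | none => exact absurd (List.map_eq_nil_iff.mp ((PySem.List.max?_eq_none_iff _ _).mp h)) hne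
    | some m => exact ⟨m, rfl⟩
  have hx1min : ∀ q ∈ F, x1 ≤ q.1 := fun q hq =>
    PySem.List.min?_isMin e1 q.1 (List.mem_map_of_mem hq)
  have hy1min : ∀ q ∈ F, y1 ≤ q.2 := fun q hq =>
    PySem.List.min?_isMin e2 q.2 (List.mem_map_of_mem hq)
  have hxMmax : ∀ q ∈ F, q.1 ≤ xM := fun q hq =>
    PySem.List.max?_isMax e3 q.1 (List.mem_map_of_mem hq)
  have hyMmax : ∀ q ∈ F, q.2 ≤ yM := fun q hq =>
    PySem.List.max?_isMax e4 q.2 (List.mem_map_of_mem hq)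
  obtain ⟨q0, hq0⟩ := List.exists_mem_of_ne_nil F hne
  set N : Nat := (xM + 1 - x1).toNat with hNdef
  set M : Nat := (yM + 1 - y1).toNat with hMdef
  have hN : ((N : Nat) : Int) = xM + 1 - x1 := by
    rw [hNdef]; have h1 := hx1min q0 hq0; have h2 := hxMmax q0 hq0; omega
  have hM : ((M : Nat) : Int) = yM + 1 - y1 := by
    rw [hMdef]; have h1 := hy1min q0 hq0; have h2 := hyMmax q0 hq0; omega
  have hNpos : 0 < N := by rw [hNdef]; have h1 := hx1min q0 hq0; have h2 := hxMmax q0 hq0; omega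
  have hMpos : 0 < M := by rw [hMdef]; have h1 := hy1min q0 hq0; have h2 := hyMmax q0 hq0; omega
  -- cells outside the bounding box are not flowers
  have hnoL : ∀ b : Int, ¬ (x1 - 1, b) ∈ F := fun b hb => by
    have := hx1min _ hb; simp at this
  have hnoR : ∀ b : Int, ¬ (xM + 1, b) ∈ F := fun b hb => by
    have := hxMmax _ hb; simp at this
  have hnoD : ∀ a : Int, ¬ (a, y1 - 1) ∈ F := fun a ha => by
    have := hy1min _ ha; simp at this
  have hnoU : ∀ a : Int, ¬ (a, yM + 1) ∈ F := fun a ha => by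
    have := hyMmax _ ha; simp at this
  -- the garden
  set g0 : Array (Array Int) := ((PySem.List.pyRange 0 (xM + 1 - x1) 1).map
      (fun _ => Array.replicate (yM + 1 - y1).toNat 0)).toArray with hg0def
  set gd := F.foldl (fun g p => pvSet2 g (p.1 - x1) (p.2 - y1) 1) g0 with hgddef
  have g0len : g0.size = N := by
    rw [hg0def, hNdef]; simp [PySem.List.length_pyRange_one]
  have g0row : ∀ u : Nat, u < N → (g0.getD u #[]).size = M := by
    intro u hu
    have hu' : u < g0.size := by rw [g0len]; exact hu
    rw [agetD_eq _ _ _ hu']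
    simp only [hg0def, List.getElem_toArray, List.getElem_map]
    rw [Array.size_replicate, hMdef]
  have g0ent : ∀ u w : Nat, u < N → w < M → (g0.getD u #[]).getD w 0 = 0 := by
    intro u w hu hw
    have hu' : u < g0.size := by rw [g0len]; exact hu
    rw [agetD_eq _ _ _ hu']
    simp only [hg0def, List.getElem_toArray, List.getElem_map]
    rw [agetD_eq _ _ _ (by rw [Array.size_replicate, ← hMdef]; exact hw)]
    simp
  obtain ⟨glen, grow, gent⟩ := grid_fold x1 y1 N M F g0 g0len g0row (fun q hq => by
    have h1 := hx1min q hq; have h2 := hxMmax q hq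
    have h3 := hy1min q hq; have h4 := hyMmax q hq
    omega)
  have hmemI : ∀ x y : Int, 0 ≤ x → x < (N:Int) → 0 ≤ y → y < (M:Int) →
      pvTruthy (pvGet gd x y) = decide ((x + x1, y + y1) ∈ F) := by
    intro x y hx hxN hy hyM
    have ex : x = ((x.toNat : Nat) : Int) := (Int.toNat_of_nonneg hx).symm
    have ey : y = ((y.toNat : Nat) : Int) := (Int.toNat_of_nonneg hy).symm
    rw [ex, ey, pvGet_natCast]
    rw [← hgddef] at gent
    rw [gent x.toNat y.toNat (by omega) (by omega), g0ent x.toNat y.toNat (by omega) (by omega)]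
    rw [← ex, ← ey]
    by_cases hmem : (x + x1, y + y1) ∈ F
    · simp [hmem, pvTruthy]
    · simp [hmem, pvTruthy]
  have hXg : ((gd.size : Nat) : Int) = ((N : Nat) : Int) := by
    rw [← hgddef] at glen
    rw [glen]
  have hrowlen : ∀ x : Int, 0 ≤ x → x < (N:Int) →
      (((aGet1 gd x #[]).size : Nat) : Int) = ((M : Nat) : Int) := by
    intro x hx hxN
    rw [← hgddef] at grow
    rw [show x = ((x.toNat : Nat) : Int) from (Int.toNat_of_nonneg hx).symm, aGet1_natCast,
      grow x.toNat (by omega)]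
  have hcondT : ∀ x y : Int, 0 ≤ x → x < (N:Int) → 0 ≤ y → y < (M:Int) →
      (pvTruthy (pvGet gd x y) && (x == 0 || !pvTruthy (pvGet gd (x - 1) y)))
        = pT F (x + x1) (y + y1) := by
    intro x y hx hxN hy hyM
    rw [hmemI x y hx hxN hy hyM, pT]
    by_cases hx0 : x = 0
    · subst hx0
      have hf : (x1 - 1, y + y1) ∉ F := hnoL _
      simp [hf]
    · rw [hmemI (x - 1) y (by omega) (by omega) hy hyM]
      have e : x - 1 + x1 = x + x1 - 1 := by ring
      rw [e, show (x == (0:Int)) = false from by simp [hx0], Bool.false_or]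
  have hcondB : ∀ x y : Int, 0 ≤ x → x < (N:Int) → 0 ≤ y → y < (M:Int) →
      (pvTruthy (pvGet gd x y) && (x == (N:Int) - 1 || !pvTruthy (pvGet gd (x + 1) y)))
        = pB F (x + x1) (y + y1) := by
    intro x y hx hxN hy hyM
    rw [hmemI x y hx hxN hy hyM, pB]
    by_cases hx0 : x = (N:Int) - 1
    · subst hx0
      rw [show (N:Int) - 1 + x1 + 1 = xM + 1 from by omega]
      have hf : (xM + 1, y + y1) ∉ F := hnoR _
      simp [hf]
    · rw [hmemI (x + 1) y (by omega) (by omega) hy hyM]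
      have e : x + 1 + x1 = x + x1 + 1 := by ring
      rw [e, show (x == (N:Int) - 1) = false from by simp [hx0], Bool.false_or]
  have hcondL : ∀ y x : Int, 0 ≤ y → y < (M:Int) → 0 ≤ x → x < (N:Int) →
      (pvTruthy (pvGet gd x y) && (y == 0 || !pvTruthy (pvGet gd x (y - 1))))
        = pL F (x + x1) (y + y1) := by
    intro y x hy hyM hx hxN
    rw [hmemI x y hx hxN hy hyM, pL]
    by_cases hy0 : y = 0
    · subst hy0
      have hf : (x + x1, y1 - 1) ∉ F := hnoD _
      simp [hf]
    · rw [hmemI x (y - 1) hx hxN (by omega) (by omega)]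
      have e : y - 1 + y1 = y + y1 - 1 := by ring
      rw [e, show (y == (0:Int)) = false from by simp [hy0], Bool.false_or]
  have hcondR : ∀ y x : Int, 0 ≤ y → y < (M:Int) → 0 ≤ x → x < (N:Int) →
      (pvTruthy (pvGet gd x y) && (y == (M:Int) - 1 || !pvTruthy (pvGet gd x (y + 1))))
        = pR F (x + x1) (y + y1) := by
    intro y x hy hyM hx hxN
    rw [hmemI x y hx hxN hy hyM, pR]
    by_cases hy0 : y = (M:Int) - 1
    · subst hy0
      rw [show (M:Int) - 1 + y1 + 1 = yM + 1 from by omega]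
      have hf : (x + x1, yM + 1) ∉ F := hnoU _
      simp [hf]
    · rw [hmemI x (y + 1) hx hxN (by omega) (by omega)]
      have e : y + 1 + y1 = y + y1 + 1 := by ring
      rw [e, show (y == (M:Int) - 1) = false from by simp [hy0], Bool.false_or]
  have hrow0 : (((aGet1 gd (0:Int) #[]).size : Nat) : Int) = ((M:Nat) : Int) :=
    hrowlen 0 le_rfl (by omega)
  rw [get_num_sides]
  simp only [e1, e2, e3, e4, Option.getD_some]
  rw [← hg0def]
  rw [← hgddef]
  simp only [hXg, hrow0]
  -- direction chains
  have hqmemT : ∀ a b : Int, (pT F a b && !pT F a (b - 1)) = true → (a, b) ∈ F := by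
    intro a b h
    simp only [pT, Bool.and_eq_true, decide_eq_true_eq] at h
    exact h.1.1
  have hqmemB : ∀ a b : Int, (pB F a b && !pB F a (b - 1)) = true → (a, b) ∈ F := by
    intro a b h
    simp only [pB, Bool.and_eq_true, decide_eq_true_eq] at h
    exact h.1.1
  have hqmemL : ∀ a b : Int, (pL F a b && !pL F (a - 1) b) = true → (a, b) ∈ F := by
    intro a b h
    simp only [pL, Bool.and_eq_true, decide_eq_true_eq] at h
    exact h.1.1
  have hqmemR : ∀ a b : Int, (pR F a b && !pR F (a - 1) b) = true → (a, b) ∈ F := by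
    intro a b h
    simp only [pR, Bool.and_eq_true, decide_eq_true_eq] at h
    exact h.1.1
  have prodS : ∀ (q : Int → Int → Bool), (∀ a b, q a b = true → (a, b) ∈ F) →
      ((PySem.List.pyRange x1 (x1 + ((N:Nat):Int)) 1 ×ˢ PySem.List.pyRange y1 (y1 + ((M:Nat):Int)) 1).countP
          (fun p => q p.1 p.2))
        = ((PySem.Set.ofList F).countP (fun p => q p.1 p.2)) := by
    intro q hq
    apply countP_eq_of_nodup
    · exact (PySem.List.nodup_pyRange_one _ _).product (PySem.List.nodup_pyRange_one _ _)
    · exact PySem.Set.nodup_ofList F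
    · intro p hp
      have hpF : p ∈ F := by
        have := hq p.1 p.2 hp
        simpa using this
      constructor
      · intro _; exact (PySem.Set.mem_ofList F p).mpr hpF
      · intro _
        have h1 := hx1min p hpF; have h2 := hxMmax p hpF
        have h3 := hy1min p hpF; have h4 := hyMmax p hpF
        rcases p with ⟨a, b⟩
        rw [List.mem_product, PySem.List.mem_pyRange_one, PySem.List.mem_pyRange_one]
        simp only at h1 h2 h3 h4
        omega
  have topsA : List.foldl
        (fun s x =>
          (pvRun (fun y => pvTruthy (pvGet gd x y) && (x == 0 || !pvTruthy (pvGet gd (x - 1) y))) (s, false)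
              (PySem.List.pyRange 0 (((aGet1 gd x #[]).size : Nat) : Int) 1)).1)
        0 (PySem.List.pyRange 0 ((N:Nat):Int) 1)
      = (((PySem.Set.ofList F).countP (fun p => pT F p.1 p.2 && !pT F p.1 (p.2 - 1)) : Nat) : Int) := by
    rw [PySem.List.foldl_congr_mem _ _
      (fun s x => s + (((PySem.List.pyRange y1 (y1 + ((M:Nat):Int)) 1).countP
          (fun b => pT F (x + x1) b && !pT F (x + x1) (b - 1)) : Nat) : Int)) 0 ?_]
    · rw [PySem.List.foldl_add, zero_add,
        sum_map_shift (fun a => (((PySem.List.pyRange y1 (y1 + ((M:Nat):Int)) 1).countP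
          (fun b => pT F a b && !pT F a (b - 1)) : Nat) : Int)) x1 N,
        sum_countP_product (PySem.List.pyRange y1 (y1 + ((M:Nat):Int)) 1)
          (fun a b => pT F a b && !pT F a (b - 1)) (PySem.List.pyRange x1 (x1 + ((N:Nat):Int)) 1),
        prodS _ hqmemT]
    · intro acc x hx
      rw [PySem.List.mem_pyRange_one] at hx
      rw [hrowlen x hx.1 hx.2]
      exact run_shift _ (fun b => pT F (x + x1) b) y1 M acc
        (fun k hk1 hk2 => hcondT x k hx.1 hx.2 hk1 hk2) (by simp [pT, hnoD])
  have botsA : List.foldl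
        (fun s x =>
          (pvRun (fun y => pvTruthy (pvGet gd x y) && (x == ((N:Nat):Int) - 1 || !pvTruthy (pvGet gd (x + 1) y))) (s, false)
              (PySem.List.pyRange 0 (((aGet1 gd x #[]).size : Nat) : Int) 1)).1)
        0 (PySem.List.pyRange 0 ((N:Nat):Int) 1).reverse
      = (((PySem.Set.ofList F).countP (fun p => pB F p.1 p.2 && !pB F p.1 (p.2 - 1)) : Nat) : Int) := by
    rw [PySem.List.foldl_congr_mem _ _
      (fun s x => s + (((PySem.List.pyRange y1 (y1 + ((M:Nat):Int)) 1).countP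
          (fun b => pB F (x + x1) b && !pB F (x + x1) (b - 1)) : Nat) : Int)) 0 ?_]
    · rw [PySem.List.foldl_add, zero_add, List.map_reverse, List.sum_reverse,
        sum_map_shift (fun a => (((PySem.List.pyRange y1 (y1 + ((M:Nat):Int)) 1).countP
          (fun b => pB F a b && !pB F a (b - 1)) : Nat) : Int)) x1 N,
        sum_countP_product (PySem.List.pyRange y1 (y1 + ((M:Nat):Int)) 1)
          (fun a b => pB F a b && !pB F a (b - 1)) (PySem.List.pyRange x1 (x1 + ((N:Nat):Int)) 1),
        prodS _ hqmemB]
    · intro acc x hx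
      rw [List.mem_reverse, PySem.List.mem_pyRange_one] at hx
      rw [hrowlen x hx.1 hx.2]
      exact run_shift _ (fun b => pB F (x + x1) b) y1 M acc
        (fun k hk1 hk2 => hcondB x k hx.1 hx.2 hk1 hk2) (by simp [pB, hnoD])
  have leftsA : List.foldl
        (fun s y =>
          (pvRun (fun x => pvTruthy (pvGet gd x y) && (y == 0 || !pvTruthy (pvGet gd x (y - 1)))) (s, false)
              (PySem.List.pyRange 0 ((N:Nat):Int) 1)).1)
        0 (PySem.List.pyRange 0 ((M:Nat):Int) 1)
      = (((PySem.Set.ofList F).countP (fun p => pL F p.1 p.2 && !pL F (p.1 - 1) p.2) : Nat) : Int) := by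
    rw [PySem.List.foldl_congr_mem _ _
      (fun s y => s + (((PySem.List.pyRange x1 (x1 + ((N:Nat):Int)) 1).countP
          (fun a => pL F a (y + y1) && !pL F (a - 1) (y + y1)) : Nat) : Int)) 0 ?_]
    · rw [PySem.List.foldl_add, zero_add,
        sum_map_shift (fun b => (((PySem.List.pyRange x1 (x1 + ((N:Nat):Int)) 1).countP
          (fun a => pL F a b && !pL F (a - 1) b) : Nat) : Int)) y1 M,
        sum_countP_product_T (PySem.List.pyRange x1 (x1 + ((N:Nat):Int)) 1)
          (PySem.List.pyRange y1 (y1 + ((M:Nat):Int)) 1)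
          (PySem.List.nodup_pyRange_one _ _) (PySem.List.nodup_pyRange_one _ _)
          (fun a b => pL F a b && !pL F (a - 1) b),
        prodS _ hqmemL]
    · intro acc y hy
      rw [PySem.List.mem_pyRange_one] at hy
      exact run_shift _ (fun a => pL F a (y + y1)) x1 N acc
        (fun k hk1 hk2 => hcondL y k hy.1 hy.2 hk1 hk2) (by simp [pL, hnoL])
  have rightsA : List.foldl
        (fun s y =>
          (pvRun (fun x => pvTruthy (pvGet gd x y) && (y == ((M:Nat):Int) - 1 || !pvTruthy (pvGet gd x (y + 1)))) (s, false)
              (PySem.List.pyRange 0 ((N:Nat):Int) 1)).1)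
        0 (PySem.List.pyRange 0 ((M:Nat):Int) 1).reverse
      = (((PySem.Set.ofList F).countP (fun p => pR F p.1 p.2 && !pR F (p.1 - 1) p.2) : Nat) : Int) := by
    rw [PySem.List.foldl_congr_mem _ _
      (fun s y => s + (((PySem.List.pyRange x1 (x1 + ((N:Nat):Int)) 1).countP
          (fun a => pR F a (y + y1) && !pR F (a - 1) (y + y1)) : Nat) : Int)) 0 ?_]
    · rw [PySem.List.foldl_add, zero_add, List.map_reverse, List.sum_reverse,
        sum_map_shift (fun b => (((PySem.List.pyRange x1 (x1 + ((N:Nat):Int)) 1).countP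
          (fun a => pR F a b && !pR F (a - 1) b) : Nat) : Int)) y1 M,
        sum_countP_product_T (PySem.List.pyRange x1 (x1 + ((N:Nat):Int)) 1)
          (PySem.List.pyRange y1 (y1 + ((M:Nat):Int)) 1)
          (PySem.List.nodup_pyRange_one _ _) (PySem.List.nodup_pyRange_one _ _)
          (fun a b => pR F a b && !pR F (a - 1) b),
        prodS _ hqmemR]
    · intro acc y hy
      rw [List.mem_reverse, PySem.List.mem_pyRange_one] at hy
      exact run_shift _ (fun a => pR F a (y + y1)) x1 N acc
        (fun k hk1 hk2 => hcondR y k hy.1 hy.2 hk1 hk2) (by simp [pR, hnoL])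
  -- B side
  have hin : ∀ a b : Int, pvIn (PySem.Set.ofList F) a b = decide ((a, b) ∈ F) := by
    intro a b
    by_cases h : (a, b) ∈ F <;> simp [pvIn, PySem.Set.mem_ofList, h]
  have hT2 : ∀ a b : Int, pvTop (PySem.Set.ofList F) a b = pT F a b := by
    intro a b; rw [pvTop, pT, hin, hin]
  have hB2 : ∀ a b : Int, pvBot (PySem.Set.ofList F) a b = pB F a b := by
    intro a b; rw [pvBot, pB, hin, hin]
  have hL2 : ∀ a b : Int, pvLeft (PySem.Set.ofList F) a b = pL F a b := by
    intro a b; rw [pvLeft, pL, hin, hin]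
  have hR2 : ∀ a b : Int, pvRight (PySem.Set.ofList F) a b = pR F a b := by
    intro a b; rw [pvRight, pR, hin, hin]
  have altEq : get_num_sides_alt F =
      (((PySem.Set.ofList F).countP (fun p => pT F p.1 p.2 && !pT F p.1 (p.2 - 1)) : Nat) : Int)
      + ((((PySem.Set.ofList F).countP (fun p => pB F p.1 p.2 && !pB F p.1 (p.2 - 1)) : Nat) : Int)
      + ((((PySem.Set.ofList F).countP (fun p => pL F p.1 p.2 && !pL F (p.1 - 1) p.2) : Nat) : Int)
      + (((PySem.Set.ofList F).countP (fun p => pR F p.1 p.2 && !pR F (p.1 - 1) p.2) : Nat) : Int))) := by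
    rw [get_num_sides_alt]
    rw [PySem.List.foldl_congr_mem _ _ (fun t p =>
        t + ((if pT F p.1 p.2 && !pT F p.1 (p.2 - 1) then (1:Int) else 0)
        + ((if pB F p.1 p.2 && !pB F p.1 (p.2 - 1) then (1:Int) else 0)
        + ((if pL F p.1 p.2 && !pL F (p.1 - 1) p.2 then (1:Int) else 0)
        + (if pR F p.1 p.2 && !pR F (p.1 - 1) p.2 then (1:Int) else 0))))) 0 ?_]
    · rw [PySem.List.foldl_add, zero_add, PySem.List.sum_map_add_int,
        PySem.List.sum_map_add_int, PySem.List.sum_map_add_int,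
        PySem.List.sum_map_ite_one_zero (fun p : Int × Int => pT F p.1 p.2 && !pT F p.1 (p.2 - 1)),
        PySem.List.sum_map_ite_one_zero (fun p : Int × Int => pB F p.1 p.2 && !pB F p.1 (p.2 - 1)),
        PySem.List.sum_map_ite_one_zero (fun p : Int × Int => pL F p.1 p.2 && !pL F (p.1 - 1) p.2),
        PySem.List.sum_map_ite_one_zero (fun p : Int × Int => pR F p.1 p.2 && !pR F (p.1 - 1) p.2)]
    · intro acc p _
      simp only [hT2, hB2, hL2, hR2]
      split_ifs <;> ring
  rw [topsA, botsA, leftsA, rightsA, altEq]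
  ring

-- ===== VERDICT (by name: the statement is the Claim_ definition above) =====
theorem get_num_sides_spec : Claim_equal_get_num_sides := by
  intro flowers _ hpre
  unfold Spec_get_num_sides
  exact main_eq flowers hpre
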